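-- pv_equiv track=rewrite | github.com/shengrihui/Leetcode | Temp/leetcode/editor/cn/[816]模糊坐标.py | ambiguousCoordinates
-- ===== SOURCE A (Python) =====
-- from typing import List
--
-- def ambiguousCoordinates(s: str) -> List[str]:
--     def dot(s: str) -> List[str]:  # 坐标的左右两部分可以加小数点的情况
--         n = len(s)
--         if n == 1:
--             return [s]
--         if s[0] == "0":  # 开头是 0
--             if s[-1] == "0":  # 结尾上也有 0
--                 return []  # 加不了小数点，整体也不行
--             return ["0." + s[1:]]
--         if s[-1] == "0":  # 结尾上有 0
--             return [s]  # 加不了小数点，只能整体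
--         # 任意位置都可以加小数点
--         return [s[:i] + "." + s[i:] for i in range(1, n)] + [s]
--
--     ans = []
--     n = len(s)
--     for i in range(2, n - 1):
--         s1 = s[1:i]
--         s2 = s[i:n - 1]
--         for a in dot(s1):
--             for b in dot(s2):
--                 ans.append(f"({a}, {b})")
--     return ans
-- ===== SOURCE B (Python) =====
-- from typing import List
--
-- def ambiguousCoordinates(s: str) -> List[str]:
--     # Accumulator recursion: digits are moved one at a time across the decimal
--     # point (dec) and across the comma (combine); no index/range enumeration.
--     def dec(left: str, right: str) -> List[str]:
--         out = []
--         if right[-1] != '0' and (len(left) == 1 or left[0] != '0'):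
--             out.append(left + '.' + right)
--         if len(right) > 1:
--             out += dec(left + right[0], right[1:])
--         return out
--
--     def numforms(t: str) -> List[str]:
--         res = dec(t[0], t[1:]) if len(t) > 1 else []
--         if len(t) == 1 or t[0] != '0':
--             res.append(t)
--         return res
--
--     core = s[1:-1]
--
--     def combine(left: str, right: str) -> List[str]:
--         if len(right) < 1 or len(left) < 1:
--             return []
--         here = [f"({a}, {b})" for a in numforms(left) for b in numforms(right)]
--         return here + (combine(left + right[0], right[1:]) if len(right) > 1 else [])
--
--     return combine(core[:1], core[1:])
-- ===== Notes on version B (the rewrite author's own statement) =====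
-- stated objective: alternative
-- what changed: A enumerates dot positions with an index range over slices inside a 4-way case-analysis helper; B has no index enumeration at all: it migrates digits one at a time across the decimal point and across the comma by accumulator recursion (dec/combine), emitting a candidate at each step that passes one validity test.
import Mathlib
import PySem

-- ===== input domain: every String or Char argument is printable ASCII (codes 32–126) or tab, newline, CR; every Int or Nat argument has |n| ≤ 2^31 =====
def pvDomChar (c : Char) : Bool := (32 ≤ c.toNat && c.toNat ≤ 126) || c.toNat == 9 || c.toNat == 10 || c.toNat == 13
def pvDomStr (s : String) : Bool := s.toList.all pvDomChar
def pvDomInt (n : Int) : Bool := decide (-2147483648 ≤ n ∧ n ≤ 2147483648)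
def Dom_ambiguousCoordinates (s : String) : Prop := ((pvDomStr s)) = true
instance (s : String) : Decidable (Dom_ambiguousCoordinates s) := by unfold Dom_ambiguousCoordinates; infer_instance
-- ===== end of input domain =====

-- B replaces A's index-range enumeration and the 4-way case helper by accumulator
-- recursion that migrates digits one at a time across the decimal point and the
-- comma (objective: alternative decomposition); equal return values on all inputs.

-- ===== PORT A =====
-- A's `dot` helper, over `List Char` (strings are built at the very end).
-- All call sites pass a nonempty list, so `headD ' '`/`getLastD ' '` transliterate
-- Python's `s[0]`/`s[-1]` exactly where they are reached.
def pvDotA (t : List Char) : List (List Char) :=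
  let n : Int := t.length
  if n = 1 then [t]
  else if t.headD ' ' = '0' then
    if t.getLastD ' ' = '0' then []
    else ['0' :: '.' :: PySem.List.slice t (some 1) none]
  else if t.getLastD ' ' = '0' then [t]
  else
    (PySem.List.pyRange 1 n 1).map
      (fun i => PySem.List.slice t none (some i) ++ '.' :: PySem.List.slice t (some i) none)
    ++ [t]

def ambiguousCoordinates (s : String) : List String :=
  let cs := s.toList
  let n : Int := cs.length
  (PySem.List.pyRange 2 (n - 1) 1).foldl (fun ans i =>
    let s1 := PySem.List.slice cs (some 1) (some i)
    let s2 := PySem.List.slice cs (some i) (some (n - 1))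
    (pvDotA s1).foldl (fun ans a =>
      (pvDotA s2).foldl (fun ans b =>
        ans ++ [String.ofList ('(' :: a ++ ',' :: ' ' :: b ++ [')'])]) ans) ans) []

-- ===== PORT B =====
-- B's `dec`: digits migrate one at a time across the decimal point (accumulator
-- recursion on `right`).  Every Python call site passes a nonempty `right`
-- (Python's `right[-1]` would raise on ''), so the `[]` branch is unreachable.
def pvDec : List Char → List Char → List (List Char)
  | _, [] => []
  | l, a :: rest =>
    let out := if (a :: rest).getLastD ' ' ≠ '0' ∧ (l.length = 1 ∨ l.headD ' ' ≠ '0')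
               then [l ++ '.' :: a :: rest] else []
    if rest.length > 0 then out ++ pvDec (l ++ [a]) rest else out

def pvNumforms (t : List Char) : List (List Char) :=
  let res := if 1 < t.length then pvDec [t.headD ' '] (PySem.List.slice t (some 1) none) else []
  if t.length = 1 ∨ t.headD ' ' ≠ '0' then res ++ [t] else res

-- B's `combine`: digits migrate one at a time across the comma.
def pvCombine : List Char → List Char → List String
  | _, [] => []
  | left, a :: rest =>
    if left.length < 1 then []
    else
      let here := (pvNumforms left).flatMap (fun x =>
        (pvNumforms (a :: rest)).map (fun b =>
          String.ofList ('(' :: x ++ ',' :: ' ' :: b ++ [')'])))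
      here ++ (if rest.length > 0 then pvCombine (left ++ [a]) rest else [])

def ambiguousCoordinates_alt (s : String) : List String :=
  let core := PySem.List.slice s.toList (some 1) (some (-1))
  pvCombine (PySem.List.slice core none (some 1)) (PySem.List.slice core (some 1) none)

-- ===== PRECONDITION & SPEC =====
def Spec_ambiguousCoordinates (s : String) (out : List String) : Prop := out = ambiguousCoordinates_alt s
instance (s : String) (out : List String) : Decidable (Spec_ambiguousCoordinates s out) := by unfold Spec_ambiguousCoordinates; infer_instance

-- ===== CLAIM (what is proved, stated in full; the proofs are below) =====
def Claim_equal_ambiguousCoordinates : Prop := ∀ (s : String), Dom_ambiguousCoordinates s → Spec_ambiguousCoordinates s (ambiguousCoordinates s)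

-- ===== LEMMAS AND PROOFS =====

-- the string built for one pair of halves
def pvMk (a b : List Char) : String := String.ofList ('(' :: a ++ ',' :: ' ' :: b ++ [')'])

-- one comma split's block of answers
def pvBlock (l r : List Char) : List String :=
  (pvNumforms l).flatMap (fun x => (pvNumforms r).map (fun b => pvMk x b))

theorem pvDec_cons (l : List Char) (a : Char) (rest : List Char) :
    pvDec l (a :: rest) =
      (if (a :: rest).getLastD ' ' ≠ '0' ∧ (l.length = 1 ∨ l.headD ' ' ≠ '0')
        then [l ++ '.' :: a :: rest] else [])
      ++ (if 0 < rest.length then pvDec (l ++ [a]) rest else []) := by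
  cases rest <;> simp [pvDec]

theorem pvDec_last_zero (r : List Char) : ∀ l, r.getLastD ' ' = '0' → pvDec l r = [] := by
  induction r with
  | nil => intro l _; rfl
  | cons a rest ih =>
    intro l hz
    rw [pvDec_cons]
    cases rest with
    | nil => simp_all
    | cons b r2 =>
      have h2 : (b :: r2).getLastD ' ' = '0' := by
        simpa [List.getLastD_eq_getLast?, List.getLast?_cons_cons] using hz
      have h2' : (b :: r2).getLast?.getD ' ' = '0' := by
        simpa [List.getLastD_eq_getLast?] using h2
      simp [ih _ h2, h2']

theorem pvDec_head_zero (r : List Char) : ∀ l, 2 ≤ l.length → l.headD ' ' = '0' → pvDec l r = [] := by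
  induction r with
  | nil => intro l _ _; rfl
  | cons a rest ih =>
    intro l hl hh
    have hh' : (l ++ [a]).headD ' ' = '0' := by
      cases l with
      | nil => simp at hl
      | cons c l' => simpa using hh
    have hl' : 2 ≤ (l ++ [a]).length := by simp; omega
    have hlen : ¬ l.length = 1 := by omega
    have hh2 : l.head?.getD ' ' = '0' := by simpa [List.headD_eq_head?] using hh
    rw [pvDec_cons]
    simp [hh2, hlen, ih _ hl' hh']

theorem pvDec_no_zero (r : List Char) : ∀ l, l ≠ [] → l.headD ' ' ≠ '0' → r ≠ [] →
    r.getLastD ' ' ≠ '0' →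
    pvDec l r = (List.range r.length).map (fun k => l ++ r.take k ++ '.' :: r.drop k) := by
  induction r with
  | nil => intro l _ _ h _; exact absurd rfl h
  | cons a rest ih =>
    intro l hl hh _ hz
    rw [pvDec_cons]
    cases rest with
    | nil =>
      have hz' : ¬ a = '0' := by simpa using hz
      have hh2 : ¬ l.head?.getD ' ' = '0' := by simpa [List.headD_eq_head?] using hh
      simp [hz', hh2, List.range_succ]
    | cons b r2 =>
      have hz2 : (b :: r2).getLastD ' ' ≠ '0' := by
        simpa [List.getLastD_eq_getLast?, List.getLast?_cons_cons] using hz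
      have hh' : (l ++ [a]).headD ' ' ≠ '0' := by
        cases l with
        | nil => exact absurd rfl hl
        | cons c l' => simpa using hh
      rw [ih (l ++ [a]) (by simp) hh' (by simp) hz2]
      simp only [hz, hh, ne_eq, not_false_eq_true, true_and, or_true, if_pos,
        List.length_cons, List.range_succ_eq_map, List.map_cons, List.map_map]
      simp [Function.comp_def]

theorem pvDec_zero_dot (r : List Char) (h : r ≠ []) (hz : r.getLastD ' ' ≠ '0') :
    pvDec ['0'] r = ['0' :: '.' :: r] := by
  cases r with
  | nil => exact absurd rfl h
  | cons a rest =>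
    rw [pvDec_cons]
    cases rest with
    | nil =>
      have hz' : ¬ a = '0' := by simpa using hz
      simp [hz']
    | cons b r2 =>
      have hrec : pvDec ['0', a] (b :: r2) = [] :=
        pvDec_head_zero (b :: r2) ['0', a] (by simp) (by simp)
      have hz' : ¬ (b :: r2).getLast?.getD ' ' = '0' := by
        simpa [List.getLastD_eq_getLast?, List.getLast?_cons_cons] using hz
      simp [hrec, hz']

theorem pvNumforms_eq_dot (t : List Char) (h : t ≠ []) : pvNumforms t = pvDotA t := by
  match t with
  | [c] => simp [pvNumforms, pvDotA]
  | c :: d :: rest =>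
    have hslice : PySem.List.slice (c :: d :: rest) (some 1) none = d :: rest := by
      simp [PySem.List.slice_from_one]
    have hlast : (c :: d :: rest).getLastD ' ' = (d :: rest).getLastD ' ' := by
      simp [List.getLastD_eq_getLast?, List.getLast?_cons_cons]
    have hn : ¬ ((c :: d :: rest).length : Int) = 1 := by simp; omega
    by_cases hc : c = '0' <;> by_cases hl : (d :: rest).getLastD ' ' = '0'
    · subst hc
      have hdec : pvDec ['0'] (d :: rest) = [] := pvDec_last_zero (d :: rest) ['0'] hl
      have hl' : (d :: rest).getLast?.getD ' ' = '0' := by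
        simpa [List.getLastD_eq_getLast?] using hl
      have hz : ¬ ((rest.length : Int) + 1 = 0) := by omega
      simp [pvNumforms, pvDotA, hslice, hdec, hl', hz]
    · subst hc
      have hdec : pvDec ['0'] (d :: rest) = ['0' :: '.' :: d :: rest] :=
        pvDec_zero_dot (d :: rest) (by simp) hl
      have hl' : ¬ (d :: rest).getLast?.getD ' ' = '0' := by
        simpa [List.getLastD_eq_getLast?] using hl
      have hz : ¬ ((rest.length : Int) + 1 = 0) := by omega
      simp [pvNumforms, pvDotA, hslice, hdec, hl', hz]
    · have hdec : pvDec [c] (d :: rest) = [] := pvDec_last_zero (d :: rest) [c] hl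
      have hl' : (d :: rest).getLast?.getD ' ' = '0' := by
        simpa [List.getLastD_eq_getLast?] using hl
      simp [pvNumforms, pvDotA, hslice, hdec, hl', hc]
    · have hdec := pvDec_no_zero (d :: rest) [c] (by simp) (by simpa using hc) (by simp) hl
      have hL : pvNumforms (c :: d :: rest) =
          (List.range (rest.length + 1)).map
            (fun k => [c] ++ (d :: rest).take k ++ '.' :: (d :: rest).drop k)
          ++ [c :: d :: rest] := by
        simp [pvNumforms, hslice, hdec, hc]
      have hR : pvDotA (c :: d :: rest) =
          (List.range (rest.length + 1)).map (fun (k : Nat) =>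
            PySem.List.slice (c :: d :: rest) none (some (1 + (k : Int))) ++
              '.' :: PySem.List.slice (c :: d :: rest) (some (1 + (k : Int))) none)
          ++ [c :: d :: rest] := by
        simp only [pvDotA]
        rw [if_neg hn, if_neg (by simpa using hc), if_neg (by rw [hlast]; exact hl),
          PySem.List.pyRange_one]
        have hr : (((c :: d :: rest).length : Int) - 1).toNat = rest.length + 1 := by
          simp
        rw [hr, List.map_map]
        simp [Function.comp_def]
      rw [hL, hR]
      congr 1
      apply List.map_congr_left
      intro k hk
      have hk' : k < rest.length + 1 := List.mem_range.mp hk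
      have h1 : PySem.List.slice (c :: d :: rest) none (some (1 + (k : Int))) =
          c :: (d :: rest).take k := by
        rw [PySem.List.slice_to _ (by omega)]
        have : ((1 : Int) + k).toNat = k + 1 := by omega
        rw [this, List.take_succ_cons]
      have h2 : PySem.List.slice (c :: d :: rest) (some (1 + (k : Int))) none =
          (d :: rest).drop k := by
        rw [PySem.List.slice_from _ (by omega)]
        have : ((1 : Int) + k).toNat = k + 1 := by omega
        rw [this, List.drop_succ_cons]
      simp [h1, h2]

theorem pvCombine_cons (left : List Char) (a : Char) (rest : List Char) :
    pvCombine left (a :: rest) =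
      if left.length < 1 then []
      else pvBlock left (a :: rest) ++ (if 0 < rest.length then pvCombine (left ++ [a]) rest else []) := by
  cases rest <;> simp [pvCombine, pvBlock, pvMk]

theorem pvCombine_eq (r : List Char) : ∀ left, left ≠ [] →
    pvCombine left r = (List.range r.length).flatMap
      (fun k => pvBlock (left ++ r.take k) (r.drop k)) := by
  induction r with
  | nil => intro l _; rfl
  | cons a rest ih =>
    intro left hleft
    have hlen : ¬ left.length < 1 := by
      cases left
      · exact absurd rfl hleft
      · simp
    rw [pvCombine_cons, if_neg hlen]
    cases rest with
    | nil => simp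
    | cons b r2 =>
      rw [if_pos (by simp), ih (left ++ [a]) (by simp)]
      simp only [List.length_cons, List.range_succ_eq_map, List.flatMap_cons, List.take_zero,
        List.append_nil, List.drop_zero, List.flatMap_map]
      simp [List.append_assoc]

theorem pv_core_eq (cs : List Char) :
    (PySem.List.pyRange 2 ((cs.length : Int) - 1) 1).flatMap (fun i =>
        (pvDotA (PySem.List.slice cs (some 1) (some i))).flatMap (fun a =>
          (pvDotA (PySem.List.slice cs (some i)
              (some ((cs.length : Int) - 1)))).map (fun b => pvMk a b))) =
      pvCombine
        (PySem.List.slice (PySem.List.slice cs (some 1) (some (-1))) none (some 1))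
        (PySem.List.slice (PySem.List.slice cs (some 1) (some (-1))) (some 1) none) := by
  by_cases hle : cs.length <= 3
  · -- too short for any split: both sides are []
    have hRange : PySem.List.pyRange 2 ((cs.length : Int) - 1) 1 = [] :=
      PySem.List.pyRange_one_eq_nil (by omega)
    have hlen1 : (PySem.List.slice cs (some 1) (some (-1))).length <= 1 := by
      by_cases hne : cs = []
      · simp [hne, PySem.List.slice]
      · simp [PySem.List.slice, PySem.List.clampIdx, hne]
        omega
    have htail : PySem.List.slice (PySem.List.slice cs (some 1) (some (-1)))
        (some 1) none = [] := by
      rw [PySem.List.slice_from_one]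
      refine List.eq_nil_of_length_eq_zero ?_
      rw [List.length_tail]
      omega
    rw [hRange, htail]
    rfl
  · rw [Nat.not_le] at hle
    have h4 : 4 <= cs.length := hle
    have hne : cs ≠ [] := by intro e; rw [e] at h4; simp at h4
    have h1 : min 1 cs.length = 1 := by omega
    have h2 : ((cs.length : Int) + -1).toNat - 1 = cs.length - 2 := by omega
    have hcore : PySem.List.slice cs (some 1) (some (-1)) =
        (cs.drop 1).take (cs.length - 2) := by
      simp [PySem.List.slice, PySem.List.clampIdx, hne, h1, h2, List.drop_one]
    obtain ⟨x, cr, hxcr⟩ : ∃ x cr, (cs.drop 1).take (cs.length - 2) = x :: cr := by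
      cases hcc : (cs.drop 1).take (cs.length - 2) with
      | nil =>
        have := congrArg List.length hcc
        simp at this
        omega
      | cons x cr => exact ⟨x, cr, rfl⟩
    have hcrlen : cr.length = cs.length - 3 := by
      have := congrArg List.length hxcr
      simp at this
      omega
    have hB : pvCombine
        (PySem.List.slice (PySem.List.slice cs (some 1) (some (-1))) none (some 1))
        (PySem.List.slice (PySem.List.slice cs (some 1) (some (-1))) (some 1) none) =
        (List.range cr.length).flatMap (fun k => pvBlock ([x] ++ cr.take k) (cr.drop k)) := by
      rw [hcore, hxcr, PySem.List.slice_from_one]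
      have hto : PySem.List.slice (x :: cr) none (some 1) = [x] := by
        rw [PySem.List.slice_to _ (by norm_num)]
        rfl
      rw [hto, List.tail_cons]
      exact pvCombine_eq cr [x] (by simp)
    rw [hB, PySem.List.pyRange_one]
    have hcast : (((cs.length : Int) - 1) - 2).toNat = cr.length := by omega
    rw [hcast, List.flatMap_map]
    apply List.flatMap_congr
    intro k hk
    have hk' : k < cr.length := List.mem_range.mp hk
    have hs1 : PySem.List.slice cs (some 1) (some (2 + (k : Int))) = [x] ++ cr.take k := by
      rw [PySem.List.slice_toNat _ (by norm_num) (by omega)]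
      have hnat : ((2 : Int) + k).toNat - (1 : Int).toNat = k + 1 := by omega
      rw [hnat]
      calc (cs.drop (1 : Int).toNat).take (k + 1)
          = ((cs.drop 1).take (cs.length - 2)).take (k + 1) := by
            rw [List.take_take]
            congr 1
            omega
        _ = (x :: cr).take (k + 1) := by rw [hxcr]
        _ = [x] ++ cr.take k := by simp
    have hs2 : PySem.List.slice cs (some (2 + (k : Int)))
        (some ((cs.length : Int) - 1)) = cr.drop k := by
      rw [PySem.List.slice_toNat _ (by omega) (by omega)]
      have ha : ((2 : Int) + k).toNat = k + 2 := by omega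
      have hb : ((cs.length : Int) - 1).toNat - (k + 2) = cs.length - 3 - k := by omega
      rw [ha, hb]
      have hdt : cr.drop k = (x :: cr).drop (k + 1) := by simp
      rw [hdt, ← hxcr, List.drop_take, List.drop_drop]
      have hxx : cs.length - 2 - (k + 1) = cs.length - 3 - k := by omega
      have hyy : 1 + (k + 1) = k + 2 := by omega
      rw [hxx, hyy]
    have hne2 : cr.drop k ≠ [] := by
      intro e
      have := congrArg List.length e
      simp at this
      omega
    simp only [hs1, hs2, pvBlock,
      pvNumforms_eq_dot ([x] ++ cr.take k) (by simp), pvNumforms_eq_dot (cr.drop k) hne2]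

theorem pv_ports_eq (s : String) : ambiguousCoordinates s = ambiguousCoordinates_alt s := by
  have hA : ambiguousCoordinates s =
      (PySem.List.pyRange 2 ((s.toList.length : Int) - 1) 1).flatMap (fun i =>
        (pvDotA (PySem.List.slice s.toList (some 1) (some i))).flatMap (fun a =>
          (pvDotA (PySem.List.slice s.toList (some i)
              (some ((s.toList.length : Int) - 1)))).map (fun b => pvMk a b))) := by
    simp only [ambiguousCoordinates, pvMk, PySem.List.foldl_append_singleton_eq_map,
      PySem.List.foldl_append_eq_flatMap, List.nil_append]
  exact hA.trans (pv_core_eq s.toList)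

-- ===== VERDICT (by name: the statement is the Claim_ definition above) =====
theorem ambiguousCoordinates_spec : Claim_equal_ambiguousCoordinates := by
  intro s _
  unfold Spec_ambiguousCoordinates
  exact pv_ports_eq s
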